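-- pv_equiv track=rewrite | github.com/lauraros/Topic-and-Methodology-Retrieval | get_categories_4_new_extraction_1.py | get_means_from_dependencies_categories
-- ===== SOURCE A (Python) =====
-- def get_means_from_dependencies_categories(deps):
--     """Categorizes means-purpose relations"""
--
--     deps_by_categories = {}
--     tools = []
--     methods = []
--     metrics = []
--     verbs = []
--     mes = ['measur', 'calculat', 'comput']
--
--     for mean, head in deps:
--         #print (mean, head)
--         if not mean[1] and not head[0] and not head[1]:
--             verbs.append([mean, head])
--
--         elif any(m for m in mes if m in mean[0] or m in head[0]):
--             metrics.append([mean, head])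
--
--         elif mean[1]:
--             tools.append([mean, head])
--         else:
--             methods.append([mean, head])
--     deps_by_categories['tools'] = tools
--     deps_by_categories['methods'] = methods
--     deps_by_categories['metrics'] = metrics
--
--     ms = [(m, [t for t in deps_by_categories[m]]) for m in deps_by_categories.keys() if deps_by_categories[m]]
--
--     return ms
-- ===== SOURCE B (Python) =====
-- def get_means_from_dependencies_categories(deps):
--     """Categorizes means-purpose relations"""
--     mes = ['measur', 'calculat', 'comput']
--
--     def label(mean, head):
--         if not mean[1] and not head[0] and not head[1]:
--             return 'verbs'
--         if any(m for m in mes if m in mean[0] or m in head[0]):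
--             return 'metrics'
--         return 'tools' if mean[1] else 'methods'
--
--     labeled = [(label(mean, head), [mean, head]) for mean, head in deps]
--     out = []
--     for cat in ['tools', 'methods', 'metrics']:
--         group = [pair for lab, pair in labeled if lab == cat]
--         if group:
--             out.append((cat, group))
--     return out
-- ===== Notes on version B (the rewrite author's own statement) =====
-- stated objective: alternative
-- what changed: B first labels each pair in one mapping pass with a category-returning helper, then groups by iterating over the fixed category names and filtering on the label, instead of A's single loop appending into four live bucket lists and a dict rebuild.
import Mathlib
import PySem

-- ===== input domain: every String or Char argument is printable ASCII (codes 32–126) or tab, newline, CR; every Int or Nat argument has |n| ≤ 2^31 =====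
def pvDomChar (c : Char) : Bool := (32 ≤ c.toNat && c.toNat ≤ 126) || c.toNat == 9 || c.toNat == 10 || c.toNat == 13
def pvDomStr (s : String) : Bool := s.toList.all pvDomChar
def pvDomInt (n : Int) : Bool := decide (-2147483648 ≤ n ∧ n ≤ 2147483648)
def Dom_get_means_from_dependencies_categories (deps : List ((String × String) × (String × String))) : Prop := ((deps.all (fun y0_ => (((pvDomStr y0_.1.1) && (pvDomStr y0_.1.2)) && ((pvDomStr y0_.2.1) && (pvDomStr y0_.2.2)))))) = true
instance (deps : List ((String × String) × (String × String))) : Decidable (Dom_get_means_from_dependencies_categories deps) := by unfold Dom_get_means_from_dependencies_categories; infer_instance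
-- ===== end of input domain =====

-- B labels each pair once with a category-returning helper, then groups by iterating over the
-- fixed category names and filtering on the label, instead of A's four live buckets in one loop.


-- ===== PORT A =====
def get_means_from_dependencies_categories (deps : List ((String × String) × (String × String))) : List (String × (List (List (String × String)))) :=
  let mes : List String := ["measur", "calculat", "comput"]
  let st := deps.foldl
    (fun (st : List (List (String × String)) × List (List (String × String)) × List (List (String × String)) × List (List (String × String)))
         (p : (String × String) × (String × String)) =>
      let (tools, methods, metrics, verbs) := st
      let (mean, head) := p
      if PySem.Str.len mean.2 == 0 && PySem.Str.len head.1 == 0 && PySem.Str.len head.2 == 0 then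
        (tools, methods, metrics, verbs ++ [[mean, head]])
      else if mes.any (fun m => PySem.Str.isIn m mean.1 || PySem.Str.isIn m head.1) then
        (tools, methods, metrics ++ [[mean, head]], verbs)
      else if !(PySem.Str.len mean.2 == 0) then
        (tools ++ [[mean, head]], methods, metrics, verbs)
      else
        (tools, methods ++ [[mean, head]], metrics, verbs))
    ([], [], [], [])
  -- dict with keys inserted in order tools, methods, metrics; then the comprehension over its keys
  let dbc : List (String × List (List (String × String))) := [("tools", st.1), ("methods", st.2.1), ("metrics", st.2.2.1)]
  dbc.filterMap (fun kv => if kv.2.isEmpty then none else some (kv.1, kv.2.map (fun t => t)))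

-- ===== PORT B =====
def pvLabel (mean head : String × String) : String :=
  if PySem.Str.len mean.2 == 0 && PySem.Str.len head.1 == 0 && PySem.Str.len head.2 == 0 then "verbs"
  else if (["measur", "calculat", "comput"]).any (fun m => PySem.Str.isIn m mean.1 || PySem.Str.isIn m head.1) then "metrics"
  else if !(PySem.Str.len mean.2 == 0) then "tools" else "methods"

def get_means_from_dependencies_categories_alt (deps : List ((String × String) × (String × String))) : List (String × (List (List (String × String)))) :=
  let labeled := deps.map (fun p => (pvLabel p.1 p.2, [p.1, p.2]))
  (["tools", "methods", "metrics"]).filterMap (fun cat =>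
    let group := (labeled.filter (fun lp => lp.1 == cat)).map (fun lp => lp.2)
    if group.isEmpty then none else some (cat, group))

-- ===== PRECONDITION & SPEC =====
def Spec_get_means_from_dependencies_categories (deps : List ((String × String) × (String × String))) (out : List (String × (List (List (String × String))))) : Prop := out = get_means_from_dependencies_categories_alt deps
instance (deps : List ((String × String) × (String × String))) (out : List (String × (List (List (String × String))))) : Decidable (Spec_get_means_from_dependencies_categories deps out) := by unfold Spec_get_means_from_dependencies_categories; infer_instance

-- ===== CLAIM (what is proved, stated in full; the proofs are below) =====
def Claim_equal_get_means_from_dependencies_categories : Prop := ∀ (deps : List ((String × String) × (String × String))), Dom_get_means_from_dependencies_categories deps → Spec_get_means_from_dependencies_categories deps (get_means_from_dependencies_categories deps)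

-- ===== LEMMAS AND PROOFS =====

/-- the labeled pairs of one category, as collected by B -/
def pvGather (cat : String) (deps : List ((String × String) × (String × String))) : List (List (String × String)) :=
  ((deps.map (fun p => (pvLabel p.1 p.2, [p.1, p.2]))).filter (fun lp => lp.1 == cat)).map (fun lp => lp.2)

theorem pvGather_cons (cat : String) (p : (String × String) × (String × String)) (rest : List ((String × String) × (String × String))) :
    pvGather cat (p :: rest) =
      (if pvLabel p.1 p.2 == cat then [[p.1, p.2]] else []) ++ pvGather cat rest := by
  simp only [pvGather, List.map_cons, List.filter_cons]
  split_ifs with h <;> simp_all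

/-- A's four fold accumulators are the initial values followed by B's per-category filters. -/
theorem pvFold_eq (deps : List ((String × String) × (String × String)))
    (t m me v : List (List (String × String))) :
    deps.foldl
      (fun (st : List (List (String × String)) × List (List (String × String)) × List (List (String × String)) × List (List (String × String)))
           (p : (String × String) × (String × String)) =>
        let (tools, methods, metrics, verbs) := st
        let (mean, head) := p
        if PySem.Str.len mean.2 == 0 && PySem.Str.len head.1 == 0 && PySem.Str.len head.2 == 0 then
          (tools, methods, metrics, verbs ++ [[mean, head]])
        else if (["measur", "calculat", "comput"] : List String).any (fun m => PySem.Str.isIn m mean.1 || PySem.Str.isIn m head.1) then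
          (tools, methods, metrics ++ [[mean, head]], verbs)
        else if !(PySem.Str.len mean.2 == 0) then
          (tools ++ [[mean, head]], methods, metrics, verbs)
        else
          (tools, methods ++ [[mean, head]], metrics, verbs))
      (t, m, me, v)
    = (t ++ pvGather "tools" deps, m ++ pvGather "methods" deps,
       me ++ pvGather "metrics" deps, v ++ pvGather "verbs" deps) := by
  induction deps generalizing t m me v with
  | nil => simp [pvGather]
  | cons p rest ih =>
    obtain ⟨mean, head⟩ := p
    simp only [List.foldl_cons]
    by_cases h1 : (PySem.Str.len mean.2 == 0 && PySem.Str.len head.1 == 0 && PySem.Str.len head.2 == 0) = true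
    · simp only [h1, if_pos, ih, pvGather_cons, pvLabel]
      simp [List.append_assoc]
    · by_cases h2 : ((["measur", "calculat", "comput"] : List String).any (fun m => PySem.Str.isIn m mean.1 || PySem.Str.isIn m head.1)) = true
      · simp only [h1, h2, if_neg, if_pos, Bool.false_eq_true, not_false_iff, ih, pvGather_cons, pvLabel]
        simp [List.append_assoc]
      · by_cases h3 : (!(PySem.Str.len mean.2 == 0)) = true
        · simp only [h1, h2, h3, ih, pvGather_cons, pvLabel]
          simp [List.append_assoc]
        · simp only [h1, h2, h3, ih, pvGather_cons, pvLabel]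
          simp [List.append_assoc]

-- ===== VERDICT (by name: the statement is the Claim_ definition above) =====
theorem get_means_from_dependencies_categories_spec : Claim_equal_get_means_from_dependencies_categories := by
  intro deps _
  show _ = _
  unfold get_means_from_dependencies_categories get_means_from_dependencies_categories_alt
  simp only [pvFold_eq, List.nil_append]
  simp [List.filterMap, pvGather]
  rfl
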